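-- pv_equiv track=rewrite | github.com/jacsmith21/crackingthecodinginterview | leet/246.py | isStrobogrammatic
-- ===== SOURCE A (Python) =====
-- def isStrobogrammatic(num):
--     """
--     :type num: str
--     :rtype: bool
--     """
--     combinations = {'6': '9', '9': '6', '8': '8', '1': '1', '0': '0'}
--
--     left = 0
--     right = len(num) - 1
--     while left <= right:
--         if num[left] not in combinations or combinations[num[left]] != num[right]:
--             return False
--
--         right -= 1
--         left += 1
--
--     return True
-- ===== SOURCE B (Python) =====
-- def isStrobogrammatic(num):
--     """
--     :type num: str
--     :rtype: bool
--     """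
--     combinations = {'6': '9', '9': '6', '8': '8', '1': '1', '0': '0'}
--     rotated = []
--     for c in reversed(num):
--         if c not in combinations:
--             return False
--         rotated.append(combinations[c])
--     return ''.join(rotated) == num
-- ===== Notes on version B (the rewrite author's own statement) =====
-- stated objective: simpler
-- what changed: Replaces the converging two-pointer index scan with a single build-then-compare pass: construct the 180-degree-rotated string from reversed(num) and test whole-string equality; correctness of the swap relies on the mapping being an involution.
import Mathlib
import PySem

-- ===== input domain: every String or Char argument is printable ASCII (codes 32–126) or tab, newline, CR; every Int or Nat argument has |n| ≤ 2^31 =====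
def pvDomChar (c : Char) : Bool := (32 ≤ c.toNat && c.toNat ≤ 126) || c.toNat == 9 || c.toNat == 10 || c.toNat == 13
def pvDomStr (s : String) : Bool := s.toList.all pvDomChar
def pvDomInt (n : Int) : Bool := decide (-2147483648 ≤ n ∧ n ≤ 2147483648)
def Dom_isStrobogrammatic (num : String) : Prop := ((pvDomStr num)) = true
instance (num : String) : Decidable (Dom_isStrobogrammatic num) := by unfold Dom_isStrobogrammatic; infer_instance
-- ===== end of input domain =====

-- B builds the 180°-rotated string from reversed(num) and compares it with num,
-- replacing A's converging two-pointer early-exit scan (objective: simpler decomposition).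

-- the dict {'6':'9','9':'6','8':'8','1':'1','0':'0'} as a partial function (shared by both ports)
def rotMap (c : Char) : Option Char :=
  if c = '6' then some '9'
  else if c = '9' then some '6'
  else if c = '8' then some '8'
  else if c = '1' then some '1'
  else if c = '0' then some '0'
  else none

-- ===== PORT A =====
-- the while-loop: left/right pointers converging
def aLoop (cs : List Char) (l r : Int) : Bool :=
  if _h : l ≤ r then
    match PySem.List.pyGet? cs l, PySem.List.pyGet? cs r with
    | some cl, some cr =>
      match rotMap cl with
      | none => false                                 -- num[left] not in combinations
      | some d => if d = cr then aLoop cs (l + 1) (r - 1) else false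
    | _, _ => false  -- unreachable from the entry call: 0 ≤ l ≤ r ≤ len-1 throughout
  else true
termination_by (r - l + 1).toNat
decreasing_by omega

def isStrobogrammatic (num : String) : Bool :=
  aLoop num.toList 0 ((num.toList.length : Int) - 1)

-- ===== PORT B =====
-- the for-loop over reversed(num), appending the mapped char, early-return on a miss
def bLoop (acc : List Char) : List Char → Option (List Char)
  | [] => some acc
  | c :: rest =>
    match rotMap c with
    | none => none                                    -- return False
    | some d => bLoop (acc ++ [d]) rest

def isStrobogrammatic_alt (num : String) : Bool :=
  match bLoop [] num.toList.reverse with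
  | none => false
  | some rotated => rotated == num.toList             -- ''.join(rotated) == num

-- ===== PRECONDITION & SPEC =====
def Spec_isStrobogrammatic (num : String) (out : Bool) : Prop := out = isStrobogrammatic_alt num
instance (num : String) (out : Bool) : Decidable (Spec_isStrobogrammatic num out) := by unfold Spec_isStrobogrammatic; infer_instance

-- ===== CLAIM (what is proved, stated in full; the proofs are below) =====
def Claim_equal_isStrobogrammatic : Prop := ∀ (num : String), Dom_isStrobogrammatic num → Spec_isStrobogrammatic num (isStrobogrammatic num)

-- ===== LEMMAS AND PROOFS =====

-- the per-index condition both programs decide: rotating position i gives the mirror position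
def Good (cs : List Char) (i : ℕ) : Prop := (cs[i]?).bind rotMap = cs[cs.length - 1 - i]?

theorem rotMap_invol {a b : Char} (h : rotMap a = some b) : rotMap b = some a := by
  unfold rotMap at h
  split_ifs at h <;>
    simp only [Option.some.injEq] at h <;> subst_vars <;> decide

theorem bLoop_acc (xs : List Char) : ∀ acc, bLoop acc xs = (bLoop [] xs).map (acc ++ ·) := by
  induction xs with
  | nil => intro acc; simp [bLoop]
  | cons c rest ih =>
    intro acc
    cases hrc : rotMap c with
    | none => simp [bLoop, hrc]
    | some d =>
      simp only [bLoop, hrc]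
      rw [ih (acc ++ [d]), ih ([] ++ [d])]
      simp [Option.map_map, Function.comp_def]

theorem bLoop_some_iff (xs : List Char) : ∀ ys, bLoop [] xs = some ys ↔
    (ys.length = xs.length ∧ ∀ i, i < xs.length → (xs[i]?).bind rotMap = ys[i]?) := by
  induction xs with
  | nil => intro ys; simp [bLoop, eq_comm, List.length_eq_zero_iff]
  | cons c rest ih =>
    intro ys
    cases hrc : rotMap c with
    | none =>
      simp only [bLoop, hrc, List.length_cons]
      constructor
      · intro h; exact absurd h (by simp)
      · rintro ⟨hl, hall⟩
        have h0 := hall 0 (by omega)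
        have : ys[0]? = some ys[0] := List.getElem?_eq_getElem (by omega)
        simp [hrc, this] at h0
    | some d =>
      simp only [bLoop, hrc, List.nil_append]
      rw [bLoop_acc, Option.map_eq_some_iff]
      constructor
      · rintro ⟨zs, hz, rfl⟩
        obtain ⟨hl, hall⟩ := (ih zs).mp hz
        refine ⟨by simp [hl], ?_⟩
        intro i hi
        cases i with
        | zero => simp [hrc]
        | succ j => simpa using hall j (by simpa using hi)
      · rintro ⟨hl, hall⟩
        cases ys with
        | nil => simp at hl
        | cons y zs =>
          have h0 := hall 0 (by simp)
          simp [hrc] at h0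
          subst h0
          refine ⟨zs, (ih zs).mpr ⟨by simpa using hl, ?_⟩, by simp⟩
          intro j hj
          simpa using hall (j + 1) (by simpa using hj)

theorem bLoop_rev_eq_self (cs : List Char) :
    bLoop [] cs.reverse = some cs ↔ ∀ i, i < cs.length → Good cs i := by
  rw [bLoop_some_iff]
  simp only [List.length_reverse]
  constructor
  · rintro ⟨-, hall⟩ j hj
    have h := hall (cs.length - 1 - j) (by omega)
    rw [List.getElem?_reverse (by omega)] at h
    rw [show cs.length - 1 - (cs.length - 1 - j) = j by omega] at h
    exact h
  · intro hall
    refine ⟨trivial, ?_⟩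
    intro i hi
    rw [List.getElem?_reverse (by omega)]
    have h := hall (cs.length - 1 - i) (by omega)
    unfold Good at h
    rw [show cs.length - 1 - (cs.length - 1 - i) = i by omega] at h
    exact h

theorem alt_iff (num : String) :
    isStrobogrammatic_alt num = true ↔
      ∀ i, i < num.toList.length → Good num.toList i := by
  unfold isStrobogrammatic_alt
  cases hb : bLoop [] num.toList.reverse with
  | none =>
    simp only [Bool.false_eq_true, false_iff]
    intro hall
    have := (bLoop_rev_eq_self num.toList).mpr hall
    rw [hb] at this
    exact absurd this (by simp)
  | some rotated =>
    simp only [beq_iff_eq]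
    constructor
    · rintro rfl
      exact (bLoop_rev_eq_self num.toList).mp hb
    · intro hall
      have := (bLoop_rev_eq_self num.toList).mpr hall
      rw [hb] at this
      exact Option.some_inj.mp this

-- A's loop returns true iff every pair (i, mirror i) with i on the left half checks out
theorem aLoop_iff (cs : List Char) : ∀ k (l r : Int), 0 ≤ l → l + r = (cs.length : Int) - 1 →
    (r - l + 1).toNat = k →
    (aLoop cs l r = true ↔ ∀ i : ℕ, l ≤ (i : Int) → 2 * i + 1 ≤ cs.length → Good cs i) := by
  intro k
  induction k using Nat.strong_induction_on with
  | _ k ih =>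
    intro l r hl hinv hk
    rw [aLoop]
    split_ifs with hlr
    · -- l ≤ r: both indices in range
      have hln : l.toNat < cs.length := by omega
      have hrn : r.toNat < cs.length := by omega
      have hgl : PySem.List.pyGet? cs l = some cs[l.toNat] :=
        PySem.List.pyGet?_eq_some_getElem cs (by omega) (by omega)
      have hgr : PySem.List.pyGet? cs r = some cs[r.toNat] :=
        PySem.List.pyGet?_eq_some_getElem cs (by omega) (by omega)
      rw [hgl, hgr]
      have hmir : cs.length - 1 - l.toNat = r.toNat := by omega
      cases hrc : rotMap cs[l.toNat] with
      | none =>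
        simp only [hrc, Bool.false_eq_true, false_iff]
        intro hall
        have := hall l.toNat (by omega) (by omega)
        unfold Good at this
        rw [List.getElem?_eq_getElem hln, hmir, List.getElem?_eq_getElem hrn] at this
        simp [hrc] at this
      | some d =>
        simp only [hrc]
        split_ifs with hd
        · rw [ih (r - 1 - (l + 1) + 1).toNat (by omega) (l + 1) (r - 1) (by omega) (by omega) rfl]
          constructor
          · intro hall i hi h2
            rcases eq_or_lt_of_le hi with heq | hlt
            · have hil : i = l.toNat := by omega
              subst hil
              unfold Good
              rw [List.getElem?_eq_getElem hln, hmir, List.getElem?_eq_getElem hrn]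
              simp [hrc, hd]
            · exact hall i (by omega) h2
          · intro hall i hi h2
            exact hall i (by omega) h2
        · simp only [false_iff]
          intro hall
          have := hall l.toNat (by omega) (by omega)
          unfold Good at this
          rw [List.getElem?_eq_getElem hln, hmir, List.getElem?_eq_getElem hrn] at this
          simp [hrc] at this
          exact hd this
    · -- l > r: loop over, condition vacuous
      simp only [true_iff]
      intro i hi h2
      omega

theorem half_iff_full (cs : List Char) :
    (∀ i : ℕ, 2 * i + 1 ≤ cs.length → Good cs i) ↔ (∀ i, i < cs.length → Good cs i) := by
  constructor
  · intro h i hi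
    by_cases h2 : 2 * i + 1 ≤ cs.length
    · exact h i h2
    · set j := cs.length - 1 - i with hj
      have hji : cs.length - 1 - j = i := by omega
      have hgj := h j (by omega)
      unfold Good at hgj ⊢
      rw [hji] at hgj
      rw [List.getElem?_eq_getElem hi] at hgj ⊢
      rw [List.getElem?_eq_getElem (show j < cs.length by omega)] at hgj
      rw [List.getElem?_eq_getElem (show cs.length - 1 - i < cs.length by omega)]
      simp only [Option.bind_some] at hgj ⊢
      have : cs[cs.length - 1 - i] = cs[j] := by congr 1
      rw [this]
      exact rotMap_invol hgj
  · intro h i hi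
    exact h i (by omega)

-- ===== VERDICT (by name: the statement is the Claim_ definition above) =====
theorem isStrobogrammatic_spec : Claim_equal_isStrobogrammatic := by
  intro num _
  unfold Spec_isStrobogrammatic
  have hA : isStrobogrammatic num = true ↔ ∀ i, i < num.toList.length → Good num.toList i := by
    unfold isStrobogrammatic
    rw [aLoop_iff num.toList _ 0 _ (by omega) (by omega) rfl, ← half_iff_full]
    constructor
    · intro h i hi; exact h i (by omega) hi
    · intro h i _ hi; exact h i hi
  have hB := alt_iff num
  cases hb : isStrobogrammatic_alt num
  · cases ha : isStrobogrammatic num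
    · rfl
    · exact absurd (hB.mpr (hA.mp ha)) (by simp [hb])
  · exact hA.mpr (hB.mp hb)
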